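-- pv_equiv track=rewrite | github.com/nevin-py/shl-assign | backend/query_processor.py | detect_skill_categories
-- ===== SOURCE A (Python) =====
-- from typing import Dict, List
--
-- def detect_skill_categories(query: str) -> Dict[str, bool]:
--     """
--     Detect what categories of skills are mentioned in the query
--     Returns dict with boolean flags for different skill types
--     """
--     query_lower = query.lower()
--
--     categories = {
--         'technical': False,
--         'behavioral': False,
--         'cognitive': False,
--         'personality': False,
--         'language': False
--     }
--
--     # Technical keywords
--     technical_keywords = ['java', 'python', 'sql', 'javascript', 'programming', 'coding',
--                          'developer', 'engineer', 'technical', 'software', 'data']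
--     if any(keyword in query_lower for keyword in technical_keywords):
--         categories['technical'] = True
--
--     # Behavioral keywords
--     behavioral_keywords = ['collaborate', 'teamwork', 'communication', 'leadership',
--                           'stakeholder', 'management', 'interpersonal']
--     if any(keyword in query_lower for keyword in behavioral_keywords):
--         categories['behavioral'] = True
--
--     # Cognitive keywords
--     cognitive_keywords = ['problem-solving', 'analytical', 'critical thinking',
--                          'logical', 'reasoning', 'cognitive']
--     if any(keyword in query_lower for keyword in cognitive_keywords):
--         categories['cognitive'] = True
--
--     # Personality keywords
--     personality_keywords = ['personality', 'behavior', 'culture fit', 'values',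
--                            'traits', 'emotional intelligence']
--     if any(keyword in query_lower for keyword in personality_keywords):
--         categories['personality'] = True
--
--     return categories
-- ===== SOURCE B (Python) =====
-- # Position-driven scan: walk the query once; at each index test which keyword starts there,
-- # recording the keyword's category in a found-set; flags are then membership tests.
-- _KEYWORD_CATEGORY = [
--     ('java', 'technical'), ('python', 'technical'), ('sql', 'technical'),
--     ('javascript', 'technical'), ('programming', 'technical'), ('coding', 'technical'),
--     ('developer', 'technical'), ('engineer', 'technical'), ('technical', 'technical'),
--     ('software', 'technical'), ('data', 'technical'),
--     ('collaborate', 'behavioral'), ('teamwork', 'behavioral'), ('communication', 'behavioral'),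
--     ('leadership', 'behavioral'), ('stakeholder', 'behavioral'), ('management', 'behavioral'),
--     ('interpersonal', 'behavioral'),
--     ('problem-solving', 'cognitive'), ('analytical', 'cognitive'), ('critical thinking', 'cognitive'),
--     ('logical', 'cognitive'), ('reasoning', 'cognitive'), ('cognitive', 'cognitive'),
--     ('personality', 'personality'), ('behavior', 'personality'), ('culture fit', 'personality'),
--     ('values', 'personality'), ('traits', 'personality'), ('emotional intelligence', 'personality'),
-- ]
-- _CATEGORIES = ('technical', 'behavioral', 'cognitive', 'personality', 'language')
--
-- def detect_skill_categories(query: str) -> dict: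
--     q = query.lower()
--     found = set()
--     for i in range(len(q)):
--         for kw, cat in _KEYWORD_CATEGORY:
--             if q.startswith(kw, i):
--                 found.add(cat)
--     return {cat: cat in found for cat in _CATEGORIES}
-- ===== Notes on version B (the rewrite author's own statement) =====
-- stated objective: alternative
-- what changed: Replaces five per-category any(keyword in query) substring scans with a single position-driven scan: one pass over the query's indices testing startswith for each keyword-category pair and accumulating the categories hit in a set; flags are then set-membership tests ('language' is never added, so it stays False).
import Mathlib
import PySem

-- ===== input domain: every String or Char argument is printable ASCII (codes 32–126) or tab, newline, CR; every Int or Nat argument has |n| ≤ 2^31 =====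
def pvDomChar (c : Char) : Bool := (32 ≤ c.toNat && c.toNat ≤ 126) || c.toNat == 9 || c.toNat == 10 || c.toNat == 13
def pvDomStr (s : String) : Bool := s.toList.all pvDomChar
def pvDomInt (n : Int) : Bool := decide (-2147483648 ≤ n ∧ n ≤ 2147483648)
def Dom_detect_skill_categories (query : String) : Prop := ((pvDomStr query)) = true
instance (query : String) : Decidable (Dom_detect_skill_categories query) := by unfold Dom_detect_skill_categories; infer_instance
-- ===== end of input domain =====

-- B replaces A's five per-category any(keyword in query) scans with one position-driven scan
-- over the query accumulating a set of categories found (alternative decomposition, same cost).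


-- ===== PORT A =====
def pvA_technical_keywords : List String := ["java", "python", "sql", "javascript", "programming", "coding",
  "developer", "engineer", "technical", "software", "data"]
def pvA_behavioral_keywords : List String := ["collaborate", "teamwork", "communication", "leadership",
  "stakeholder", "management", "interpersonal"]
def pvA_cognitive_keywords : List String := ["problem-solving", "analytical", "critical thinking",
  "logical", "reasoning", "cognitive"]
def pvA_personality_keywords : List String := ["personality", "behavior", "culture fit", "values",
  "traits", "emotional intelligence"]

def detect_skill_categories (query : String) : List (String × Bool) :=
  let query_lower := PySem.Str.lower query
  let categories : PySem.Dict String Bool :=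
    ((((PySem.Dict.empty.insert "technical" false).insert "behavioral" false).insert
      "cognitive" false).insert "personality" false).insert "language" false
  let categories := if pvA_technical_keywords.any (fun kw => PySem.Str.isIn kw query_lower)
    then categories.insert "technical" true else categories
  let categories := if pvA_behavioral_keywords.any (fun kw => PySem.Str.isIn kw query_lower)
    then categories.insert "behavioral" true else categories
  let categories := if pvA_cognitive_keywords.any (fun kw => PySem.Str.isIn kw query_lower)
    then categories.insert "cognitive" true else categories
  let categories := if pvA_personality_keywords.any (fun kw => PySem.Str.isIn kw query_lower)
    then categories.insert "personality" true else categories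
  categories.items

-- ===== PORT B =====
def pvB_pairs : List (String × String) :=
  [("java", "technical"), ("python", "technical"), ("sql", "technical"),
   ("javascript", "technical"), ("programming", "technical"), ("coding", "technical"),
   ("developer", "technical"), ("engineer", "technical"), ("technical", "technical"),
   ("software", "technical"), ("data", "technical"),
   ("collaborate", "behavioral"), ("teamwork", "behavioral"), ("communication", "behavioral"),
   ("leadership", "behavioral"), ("stakeholder", "behavioral"), ("management", "behavioral"),
   ("interpersonal", "behavioral"),
   ("problem-solving", "cognitive"), ("analytical", "cognitive"), ("critical thinking", "cognitive"),
   ("logical", "cognitive"), ("reasoning", "cognitive"), ("cognitive", "cognitive"),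
   ("personality", "personality"), ("behavior", "personality"), ("culture fit", "personality"),
   ("values", "personality"), ("traits", "personality"), ("emotional intelligence", "personality")]
def pvB_cats : List String := ["technical", "behavioral", "cognitive", "personality", "language"]

def detect_skill_categories_alt (query : String) : List (String × Bool) :=
  let q := (PySem.Str.lower query).toList
  -- q.startswith(kw, i) with 0 ≤ i < len(q): exact as a prefix test on q's suffix from i
  let found : PySem.Set String :=
    (List.range q.length).foldl (fun found i =>
      pvB_pairs.foldl (fun found p =>
        if PySem.Chars.startswith (q.drop i) p.1.toList then PySem.Set.add found p.2 else found)
        found)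
      PySem.Set.empty
  pvB_cats.map (fun cat => (cat, PySem.Set.contains found cat))

-- ===== PRECONDITION & SPEC =====
def Spec_detect_skill_categories (query : String) (out : List (String × Bool)) : Prop := out = detect_skill_categories_alt query
instance (query : String) (out : List (String × Bool)) : Decidable (Spec_detect_skill_categories query out) := by unfold Spec_detect_skill_categories; infer_instance

-- ===== CLAIM (what is proved, stated in full; the proofs are below) =====
def Claim_equal_detect_skill_categories : Prop := ∀ (query : String), Dom_detect_skill_categories query → Spec_detect_skill_categories query (detect_skill_categories query)

-- ===== LEMMAS AND PROOFS =====

-- membership in the inner fold (over keyword/category pairs)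
theorem pv_mem_inner (l : List (String × String)) (q : List Char) (i : Nat)
    (found : PySem.Set String) (c : String) :
    c ∈ l.foldl (fun found p =>
        if PySem.Chars.startswith (q.drop i) p.1.toList then PySem.Set.add found p.2 else found)
        found ↔
      c ∈ found ∨ ∃ p ∈ l, PySem.Chars.startswith (q.drop i) p.1.toList = true ∧ p.2 = c := by
  induction l generalizing found with
  | nil => simp
  | cons p l ih =>
    simp only [List.foldl_cons, List.mem_cons, ih]
    by_cases h : PySem.Chars.startswith (q.drop i) p.1.toList = true
    · simp [h, PySem.Set.mem_add]; tauto
    · simp only [if_neg h]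
      constructor
      · rintro (hf | hx); · exact Or.inl hf
        · exact Or.inr ⟨hx.choose, Or.inr hx.choose_spec.1, hx.choose_spec.2⟩
      · rintro (hf | ⟨p', hp', hs, hc⟩); · exact Or.inl hf
        · rcases hp' with rfl | hp'
          · exact absurd hs h
          · exact Or.inr ⟨p', hp', hs, hc⟩

-- membership in the outer fold (over the positions of q)
theorem pv_mem_outer (n : Nat) (q : List Char) (found : PySem.Set String) (c : String) :
    c ∈ (List.range n).foldl (fun found i =>
        pvB_pairs.foldl (fun found p =>
          if PySem.Chars.startswith (q.drop i) p.1.toList then PySem.Set.add found p.2 else found)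
          found)
        found ↔
      c ∈ found ∨ ∃ i < n, ∃ p ∈ pvB_pairs,
        PySem.Chars.startswith (q.drop i) p.1.toList = true ∧ p.2 = c := by
  induction n generalizing found with
  | zero => simp
  | succ n ih =>
    rw [List.range_succ, List.foldl_append]
    simp only [List.foldl_cons, List.foldl_nil, ih, pv_mem_inner]
    constructor
    · rintro ((hf | ⟨i, hi, hx⟩) | hx)
      · exact Or.inl hf
      · exact Or.inr ⟨i, Nat.lt_succ_of_lt hi, hx⟩
      · exact Or.inr ⟨n, Nat.lt_succ_self n, hx⟩
    · rintro (hf | ⟨i, hi, hx⟩)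
      · exact Or.inl (Or.inl hf)
      · rcases Nat.lt_succ_iff_lt_or_eq.mp hi with hi | rfl
        · exact Or.inl (Or.inr ⟨i, hi, hx⟩)
        · exact Or.inr hx

-- a nonempty keyword is an infix of q iff it starts at some position < q.length
theorem pv_infix_iff_pos (kw q : List Char) (hkw : kw ≠ []) :
    kw <:+: q ↔ ∃ i < q.length, kw <+: q.drop i := by
  constructor
  · intro h
    have h2 : PySem.Chars.isIn kw q = true := (PySem.Chars.isIn_iff_infix kw q).mpr h
    obtain ⟨j, hj⟩ := (PySem.Chars.exists_prefix_drop_iff_isIn kw q).mpr h2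
    refine ⟨j, ?_, hj⟩
    by_contra hge
    rw [not_lt] at hge
    rw [List.drop_eq_nil_of_le hge] at hj
    exact hkw (List.prefix_nil.mp hj)
  · rintro ⟨i, _, hp⟩
    exact (PySem.Chars.isIn_iff_infix kw q).mp
      ((PySem.Chars.exists_prefix_drop_iff_isIn kw q).mp ⟨i, hp⟩)

-- per category: A's any-scan equals membership of the category in B's found-set
theorem pv_flag_eq (q : List Char) (c : String) (K : List String)
    (hbridge : ∀ P : String → Prop, (∃ p ∈ pvB_pairs, P p.1 ∧ p.2 = c) ↔ ∃ kw ∈ K, P kw)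
    (hne : ∀ kw ∈ K, kw.toList ≠ []) :
    (K.any fun kw => PySem.Chars.isIn kw.toList q) =
      PySem.Set.contains
        ((List.range q.length).foldl (fun found i =>
          pvB_pairs.foldl (fun found p =>
            if PySem.Chars.startswith (q.drop i) p.1.toList then PySem.Set.add found p.2 else found)
            found)
          PySem.Set.empty) c := by
  rw [Bool.eq_iff_iff, PySem.Set.contains_iff, pv_mem_outer, List.any_eq_true]
  have hempty : c ∉ (PySem.Set.empty : PySem.Set String) := by
    simp [PySem.Set.empty]
  constructor
  · rintro ⟨kw, hkw, hin⟩
    obtain ⟨i, hi, hp⟩ := (pv_infix_iff_pos kw.toList q (hne kw hkw)).mp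
      ((PySem.Chars.isIn_iff_infix _ _).mp hin)
    refine Or.inr ⟨i, hi, ?_⟩
    have := (hbridge fun s => PySem.Chars.startswith (q.drop i) s.toList = true).mpr
      ⟨kw, hkw, (PySem.Chars.startswith_iff _ _).mpr hp⟩
    exact this
  · rintro (hf | ⟨i, hi, hx⟩)
    · exact absurd hf hempty
    · obtain ⟨kw, hkw, hs⟩ :=
        (hbridge fun s => PySem.Chars.startswith (q.drop i) s.toList = true).mp hx
      refine ⟨kw, hkw, (PySem.Chars.isIn_iff_infix _ _).mpr ?_⟩
      exact (pv_infix_iff_pos kw.toList q (hne kw hkw)).mpr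
        ⟨i, hi, (PySem.Chars.startswith_iff _ _).mp hs⟩

-- 'language' is never a category of any pair, so B never adds it to the found-set
theorem pv_language (q : List Char) :
    PySem.Set.contains
      ((List.range q.length).foldl (fun found i =>
        pvB_pairs.foldl (fun found p =>
          if PySem.Chars.startswith (q.drop i) p.1.toList then PySem.Set.add found p.2 else found)
          found)
        PySem.Set.empty) "language" = false := by
  rw [Bool.eq_false_iff]
  intro h
  rw [PySem.Set.contains_iff, pv_mem_outer] at h
  rcases h with hf | ⟨i, _, p, hp, _, hc⟩
  · simp [PySem.Set.empty] at hf
  · have : ∀ p ∈ pvB_pairs, p.2 ≠ "language" := by decide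
    exact this p hp hc

theorem pv_eq (query : String) :
    detect_skill_categories query = detect_skill_categories_alt query := by
  simp only [detect_skill_categories, detect_skill_categories_alt, pvB_cats,
    List.map_cons, List.map_nil]
  have hT := pv_flag_eq (PySem.Str.lower query).toList "technical" pvA_technical_keywords
    (by intro P; simp [pvB_pairs, pvA_technical_keywords])
    (by decide)
  have hB := pv_flag_eq (PySem.Str.lower query).toList "behavioral" pvA_behavioral_keywords
    (by intro P; simp [pvB_pairs, pvA_behavioral_keywords])
    (by decide)
  have hC := pv_flag_eq (PySem.Str.lower query).toList "cognitive" pvA_cognitive_keywords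
    (by intro P; simp [pvB_pairs, pvA_cognitive_keywords])
    (by decide)
  have hP := pv_flag_eq (PySem.Str.lower query).toList "personality" pvA_personality_keywords
    (by intro P; simp [pvB_pairs, pvA_personality_keywords])
    (by decide)
  simp only [PySem.Str.isIn_eq] at hT hB hC hP ⊢
  rw [← hT, ← hB, ← hC, ← hP, pv_language]
  rcases Bool.dichotomy (pvA_technical_keywords.any fun kw => PySem.Chars.isIn kw.toList (PySem.Str.lower query).toList) with h1 | h1 <;>
  rcases Bool.dichotomy (pvA_behavioral_keywords.any fun kw => PySem.Chars.isIn kw.toList (PySem.Str.lower query).toList) with h2 | h2 <;>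
  rcases Bool.dichotomy (pvA_cognitive_keywords.any fun kw => PySem.Chars.isIn kw.toList (PySem.Str.lower query).toList) with h3 | h3 <;>
  rcases Bool.dichotomy (pvA_personality_keywords.any fun kw => PySem.Chars.isIn kw.toList (PySem.Str.lower query).toList) with h4 | h4 <;>
  · simp only [h1, h2, h3, h4]
    rfl

-- ===== VERDICT (by name: the statement is the Claim_ definition above) =====
theorem detect_skill_categories_spec : Claim_equal_detect_skill_categories := by
  intro query _
  unfold Spec_detect_skill_categories
  exact pv_eq query
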